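-- pv_equiv track=rewrite | github.com/ana2bell/Get-Programming-with-Python-in-Motion | u6m2_modularity_and_abstractions_using_functions.py | seat_at_tables
-- ===== SOURCE A (Python) =====
-- def seat_at_tables(group):
--     """
--     group: an int
--     Given 3 tables of size 6 and 3 tables of size 4,
--     return True if the group can be seated so that they
--     completely fill any combination of tables.
--     Return False if not.
--     """
--     big_size = 6
--     big_count = 3
--     small_size = 4
--     small_count = 3
--
--     possible = ()
--
--     for i in range(big_count + 1):
--         for j in range(small_count + 1):
--             possible += (i*big_size + j*small_size, )
--
--     return group in possible
-- ===== SOURCE B (Python) =====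
-- def seat_at_tables(group):
--     for i in range(4):
--         rem = group - 6 * i
--         if rem >= 0 and rem % 4 == 0 and rem // 4 <= 3:
--             return True
--     return False
-- ===== Notes on version B (the rewrite author's own statement) =====
-- stated objective: simpler
-- what changed: Instead of enumerating every table-sum combination into a tuple and testing membership, B loops only over the possible big-table counts and checks arithmetically that the remainder is a non-negative multiple of the small table size that fits on the available small tables.
import Mathlib
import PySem

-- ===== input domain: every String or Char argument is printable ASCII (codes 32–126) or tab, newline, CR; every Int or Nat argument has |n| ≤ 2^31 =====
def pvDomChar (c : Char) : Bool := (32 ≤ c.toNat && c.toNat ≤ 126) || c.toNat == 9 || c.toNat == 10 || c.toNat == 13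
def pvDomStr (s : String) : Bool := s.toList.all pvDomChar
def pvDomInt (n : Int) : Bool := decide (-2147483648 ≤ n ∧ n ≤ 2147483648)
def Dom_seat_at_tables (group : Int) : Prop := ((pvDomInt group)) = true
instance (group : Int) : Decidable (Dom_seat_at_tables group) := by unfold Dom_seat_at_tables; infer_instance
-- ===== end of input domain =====

-- B replaces A's enumeration of all 16 table sums with a 4-step arithmetic check (simpler decomposition).

-- ===== PORT A =====
def seat_at_tables (group : Int) : Bool :=
  let big_size : Int := 6
  let big_count : Int := 3
  let small_size : Int := 4
  let small_count : Int := 3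
  let possible : List Int :=
    (PySem.List.pyRange 0 (big_count + 1) 1).foldl (fun acc i =>
      (PySem.List.pyRange 0 (small_count + 1) 1).foldl (fun acc2 j =>
        acc2 ++ [i * big_size + j * small_size]) acc) []
  possible.contains group

-- ===== PORT B =====
def seat_at_tables_alt (group : Int) : Bool :=
  (PySem.List.pyRange 0 4 1).foldl (fun found i =>
    if found then found
    else
      let rem := group - 6 * i
      decide (0 ≤ rem) && decide (PySem.Int.mod rem 4 = 0) &&
        decide (PySem.Int.floordiv rem 4 ≤ 3)) false

-- ===== PRECONDITION & SPEC =====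
def Spec_seat_at_tables (group : Int) (out : Bool) : Prop := out = seat_at_tables_alt group
instance (group : Int) (out : Bool) : Decidable (Spec_seat_at_tables group out) := by unfold Spec_seat_at_tables; infer_instance

-- ===== CLAIM (what is proved, stated in full; the proofs are below) =====
def Claim_equal_seat_at_tables : Prop := ∀ (group : Int), Dom_seat_at_tables group → Spec_seat_at_tables group (seat_at_tables group)

-- ===== LEMMAS AND PROOFS =====

-- Outside [0, 30] both programs return false.
theorem seat_at_tables_false_of_out (g : Int) (h : ¬ (0 ≤ g ∧ g ≤ 30)) :
    seat_at_tables g = false ∧ seat_at_tables_alt g = false := by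
  constructor
  · simp only [seat_at_tables,
      show PySem.List.pyRange 0 (3 + 1) 1 = [0, 1, 2, 3] from by decide,
      List.foldl, List.nil_append, List.cons_append]
    simp only [List.contains_cons, List.contains_nil, Bool.or_eq_false_iff, beq_eq_false_iff_ne,
      ne_eq]
    norm_num
    omega
  · simp only [seat_at_tables_alt,
      show PySem.List.pyRange 0 4 1 = [0, 1, 2, 3] from by decide,
      List.foldl,
      PySem.Int.mod_eq_emod_of_pos (b := 4) (by norm_num),
      PySem.Int.floordiv_eq_ediv_of_pos (b := 4) (by norm_num),
      show ∀ (b c : Bool), (if b then b else c) = (b || c) from by decide,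
      Bool.or_eq_false_iff, Bool.and_eq_false_iff, decide_eq_false_iff_not, not_le]
    refine ⟨⟨⟨⟨trivial, ?_⟩, ?_⟩, ?_⟩, ?_⟩ <;> omega

-- ===== VERDICT (by name: the statement is the Claim_ definition above) =====
theorem seat_at_tables_spec : Claim_equal_seat_at_tables := by
  intro g _
  unfold Spec_seat_at_tables
  by_cases h : 0 ≤ g ∧ g ≤ 30
  · obtain ⟨h1, h2⟩ := h
    interval_cases g <;> decide
  · obtain ⟨ha, hb⟩ := seat_at_tables_false_of_out g h
    rw [ha, hb]
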